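-- pv_equiv track=rewrite | github.com/MaximumFire/project-euler | 51-100/61/main.py | semi_check
-- ===== SOURCE A (Python) =====
-- from itertools import combinations, permutations
--
-- def semi_check(x):
--     r = 0
--     c = list(combinations([n for n in range(len(x))], 2))
--     for a in c:
--         if str(x[a[0]])[2:] == str(x[a[1]])[:2] or str(x[a[1]])[2:] == str(x[a[0]])[:2]:
--             r += 1
--     if r < (len(x) - 1):
--         return False
--     return True
-- ===== SOURCE B (Python) =====
-- def semi_check(x):
--     suf_seen = {}
--     pre_seen = {}
--     pair_seen = {}
--     r = 0
--     for v in x: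
--         s = str(v)
--         p, q = s[:2], s[2:]
--         r += suf_seen.get(p, 0) + pre_seen.get(q, 0) - pair_seen.get((q, p), 0)
--         suf_seen[q] = suf_seen.get(q, 0) + 1
--         pre_seen[p] = pre_seen.get(p, 0) + 1
--         pair_seen[(p, q)] = pair_seen.get((p, q), 0) + 1
--     return r >= len(x) - 1
-- ===== Notes on version B (the rewrite author's own statement) =====
-- stated objective: faster
-- what changed: A scans all O(n^2) index pairs re-stringifying both elements per pair; B makes one pass keeping hash-map counters of the two-char prefixes, suffixes and (prefix,suffix) keys seen so far and adds each element's match count by inclusion-exclusion (suffix-hits + prefix-hits - double-hits).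
import Mathlib
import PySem

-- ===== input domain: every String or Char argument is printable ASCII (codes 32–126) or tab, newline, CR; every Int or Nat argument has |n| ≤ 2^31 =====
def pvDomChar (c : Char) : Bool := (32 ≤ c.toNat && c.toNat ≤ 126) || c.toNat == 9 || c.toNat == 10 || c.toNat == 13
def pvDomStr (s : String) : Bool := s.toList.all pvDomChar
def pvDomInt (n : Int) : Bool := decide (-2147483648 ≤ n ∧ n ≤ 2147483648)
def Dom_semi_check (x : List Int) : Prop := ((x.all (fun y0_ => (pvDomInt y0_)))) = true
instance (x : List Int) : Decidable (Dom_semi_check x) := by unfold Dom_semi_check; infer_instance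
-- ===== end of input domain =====

-- B replaces A's quadratic scan over all index pairs by one pass keeping hash counters of the
-- two-char prefixes/suffixes seen so far, counting matches by inclusion-exclusion (objective: faster).

-- ===== PORT A =====
-- itertools.combinations(l, 2) in itertools' order
def pvComb2 {α : Type} : List α → List (α × α)
  | [] => []
  | h :: t => t.map (fun j => (h, j)) ++ pvComb2 t

def semi_check (x : List Int) : Bool :=
  let c := pvComb2 (PySem.List.pyRange 0 (x.length : Int))
  let r : Int := c.foldl (fun r a =>
    if (PySem.Str.slice (PySem.Int.toStr (PySem.List.pyGetD x a.1 0)) (some 2) none ==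
          PySem.Str.slice (PySem.Int.toStr (PySem.List.pyGetD x a.2 0)) none (some 2)) ||
       (PySem.Str.slice (PySem.Int.toStr (PySem.List.pyGetD x a.2 0)) (some 2) none ==
          PySem.Str.slice (PySem.Int.toStr (PySem.List.pyGetD x a.1 0)) none (some 2))
    then r + 1 else r) 0
  if r < (x.length : Int) - 1 then false else true

-- ===== PORT B =====
-- (prefix s[:2], suffix s[2:]) of str(v)
def pvKey (v : Int) : String × String :=
  let s := PySem.Int.toStr v
  (PySem.Str.slice s none (some 2), PySem.Str.slice s (some 2) none)

def semi_check_alt (x : List Int) : Bool :=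
  let st := x.foldl
    (fun (st : PySem.Dict String Int × PySem.Dict String Int × PySem.Dict (String × String) Int × Int) v =>
      match st with
      | (sufSeen, preSeen, pairSeen, r) =>
        let k := pvKey v
        let r' := r + sufSeen.getD k.1 0 + preSeen.getD k.2 0 - pairSeen.getD (k.2, k.1) 0
        (sufSeen.insert k.2 (sufSeen.getD k.2 0 + 1),
         preSeen.insert k.1 (preSeen.getD k.1 0 + 1),
         pairSeen.insert k (pairSeen.getD k 0 + 1),
         r'))
    (PySem.Dict.empty, PySem.Dict.empty, PySem.Dict.empty, (0 : Int))
  decide (st.2.2.2 ≥ (x.length : Int) - 1)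

-- ===== PRECONDITION & SPEC =====
def Spec_semi_check (x : List Int) (out : Bool) : Prop := out = semi_check_alt x
instance (x : List Int) (out : Bool) : Decidable (Spec_semi_check x out) := by unfold Spec_semi_check; infer_instance

-- ===== CLAIM (what is proved, stated in full; the proofs are below) =====
def Claim_equal_semi_check : Prop := ∀ (x : List Int), Dom_semi_check x → Spec_semi_check x (semi_check x)

-- ===== LEMMAS AND PROOFS =====

-- the match test of A's loop, on key pairs: a (earlier) matches b (later)
def pvM (a b : String × String) : Bool := (a.2 == b.1) || (b.2 == a.1)

-- pair count, grouped by the earlier element (A's combinations grouping)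
def pvPC : List (String × String) → Nat
  | [] => 0
  | h :: t => t.countP (fun b => pvM h b) + pvPC t

-- pair count, grouped by the later element against the already-seen list (B's grouping)
def pvG : List (String × String) → List (String × String) → Int
  | _, [] => 0
  | s, k :: t => (s.countP (fun a => pvM a k) : Int) + pvG (s ++ [k]) t

-- B's per-element step on (sufSeen, preSeen, pairSeen, r), applied to the key
def pvStep
    (st : PySem.Dict String Int × PySem.Dict String Int × PySem.Dict (String × String) Int × Int)
    (k : String × String) :
    PySem.Dict String Int × PySem.Dict String Int × PySem.Dict (String × String) Int × Int :=
  match st with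
  | (sufSeen, preSeen, pairSeen, r) =>
    (sufSeen.insert k.2 (sufSeen.getD k.2 0 + 1),
     preSeen.insert k.1 (preSeen.getD k.1 0 + 1),
     pairSeen.insert k (pairSeen.getD k 0 + 1),
     r + sufSeen.getD k.1 0 + preSeen.getD k.2 0 - pairSeen.getD (k.2, k.1) 0)

-- B's loop state built from the list of already-processed keys
def pvSufD (s : List (String × String)) : PySem.Dict String Int :=
  s.foldl (fun d k => d.insert k.2 (d.getD k.2 0 + 1)) PySem.Dict.empty
def pvPreD (s : List (String × String)) : PySem.Dict String Int :=
  s.foldl (fun d k => d.insert k.1 (d.getD k.1 0 + 1)) PySem.Dict.empty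
def pvPairD (s : List (String × String)) : PySem.Dict (String × String) Int :=
  s.foldl (fun d k => d.insert k (d.getD k 0 + 1)) PySem.Dict.empty

-- keyed counter fold (the keyed twin of PySem.Dict.getD_foldl_insert_add_one)
theorem pvCnt_getD {κ : Type} [BEq κ] [LawfulBEq κ] (g : String × String → κ)
    (s : List (String × String)) (d : PySem.Dict κ Int) (v : κ) :
    (s.foldl (fun d k => d.insert (g k) (d.getD (g k) 0 + 1)) d).getD v 0
      = d.getD v 0 + ((s.map g).count v : Int) := by
  induction s generalizing d with
  | nil => simp
  | cons h t ih =>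
    simp only [List.foldl_cons, List.map_cons, ih]
    by_cases hv : v = g h
    · subst hv; simp; ring
    · have hne : ¬ (g h == v) = true := by simp [beq_iff_eq]; exact fun e => hv e.symm
      simp [PySem.Dict.getD_insert_of_ne, hv, List.count_cons, hne]

theorem pvSufD_getD (s : List (String × String)) (v : String) :
    (pvSufD s).getD v 0 = ((s.map (·.2)).count v : Int) := by
  unfold pvSufD; rw [pvCnt_getD]; simp

theorem pvPreD_getD (s : List (String × String)) (v : String) :
    (pvPreD s).getD v 0 = ((s.map (·.1)).count v : Int) := by
  unfold pvPreD; rw [pvCnt_getD]; simp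

theorem pvPairD_getD (s : List (String × String)) (v : String × String) :
    (pvPairD s).getD v 0 = (s.count v : Int) := by
  unfold pvPairD
  simp [PySem.Dict.getD_foldl_insert_add_one]

-- inclusion-exclusion for countP, subtraction-free form
theorem pvCountP_or {α : Type} (pa pb : α → Bool) (l : List α) :
    l.countP (fun a => pa a || pb a) + l.countP (fun a => pa a && pb a)
      = l.countP pa + l.countP pb := by
  induction l with
  | nil => rfl
  | cons h t ih =>
    by_cases ha : pa h <;> by_cases hb : pb h <;>
      simp [ha, hb] <;> omega

-- the per-step value B reads from its three counters is the seen-match count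
theorem pvStep_count (s : List (String × String)) (k : String × String) :
    (pvSufD s).getD k.1 0 + (pvPreD s).getD k.2 0 - (pvPairD s).getD (k.2, k.1) 0
      = (s.countP (fun a => pvM a k) : Int) := by
  rw [pvSufD_getD, pvPreD_getD, pvPairD_getD]
  have h1 : (s.map (·.2)).count k.1 = s.countP (fun a => a.2 == k.1) := by
    simp only [List.count, List.countP_map]
    exact List.countP_congr (fun a _ => Iff.rfl)
  have h2 : (s.map (·.1)).count k.2 = s.countP (fun a => k.2 == a.1) := by
    simp only [List.count, List.countP_map]
    refine List.countP_congr (fun a _ => ?_)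
    rw [show ((fun x => x == k.2) ∘ fun x : String × String => x.1) a = (a.1 == k.2) from rfl,
        Bool.beq_comm]
  have h3 : s.count (k.2, k.1) = s.countP (fun a => (a.2 == k.1) && (k.2 == a.1)) := by
    simp only [List.count]
    refine List.countP_congr (fun a _ => ?_)
    simp only [beq_iff_eq, Bool.and_eq_true, Prod.ext_iff]
    constructor
    · rintro ⟨u, w⟩; exact ⟨w, u.symm⟩
    · rintro ⟨w, u⟩; exact ⟨u.symm, w⟩
  have h4 := pvCountP_or (fun a : String × String => a.2 == k.1) (fun a => k.2 == a.1) s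
  rw [h1, h2, h3]
  unfold pvM
  omega

-- B's fold, started from the state of a seen-list s, adds exactly pvG s l
theorem pvFold_inv (l s : List (String × String)) (r : Int) :
    (l.foldl pvStep (pvSufD s, pvPreD s, pvPairD s, r))
    = (pvSufD (s ++ l), pvPreD (s ++ l), pvPairD (s ++ l), r + pvG s l) := by
  induction l generalizing s r with
  | nil => simp [pvG]
  | cons k t ih =>
    have hs : pvSufD (s ++ [k]) = (pvSufD s).insert k.2 ((pvSufD s).getD k.2 0 + 1) := by
      unfold pvSufD; rw [List.foldl_append]; rfl
    have hp : pvPreD (s ++ [k]) = (pvPreD s).insert k.1 ((pvPreD s).getD k.1 0 + 1) := by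
      unfold pvPreD; rw [List.foldl_append]; rfl
    have hq : pvPairD (s ++ [k]) = (pvPairD s).insert k ((pvPairD s).getD k 0 + 1) := by
      unfold pvPairD; rw [List.foldl_append]; rfl
    simp only [List.foldl_cons, pvStep, ← hs, ← hp, ← hq, pvG]
    rw [show r + (pvSufD s).getD k.1 0 + (pvPreD s).getD k.2 0 - (pvPairD s).getD (k.2, k.1) 0
          = r + ((s.countP (fun a => pvM a k) : Nat) : Int) by
        rw [← pvStep_count s k]; ring]
    rw [ih]
    simp [List.append_assoc, add_assoc]

-- cross count: matches of each element of l against every element of s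
def pvCross (s l : List (String × String)) : Int :=
  (l.map (fun k => ((s.countP (fun a => pvM a k) : Nat) : Int))).sum

theorem pvCross_append (s s' l : List (String × String)) :
    pvCross (s ++ s') l = pvCross s l + pvCross s' l := by
  unfold pvCross
  rw [← PySem.List.sum_map_add_int]
  congr 1
  apply List.map_congr_left
  intro k _
  rw [List.countP_append]
  push_cast
  ring

theorem pvG_split (l s : List (String × String)) :
    pvG s l = pvCross s l + pvG [] l := by
  induction l generalizing s with
  | nil => simp [pvG, pvCross]
  | cons k t ih =>
    simp only [pvG, List.nil_append]
    rw [ih (s ++ [k]), ih [k], pvCross_append]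
    simp only [pvCross, List.map_cons, List.sum_cons, List.countP_nil]
    push_cast
    ring

theorem pvCross_singleton (h : String × String) (t : List (String × String)) :
    pvCross [h] t = (t.countP (fun b => pvM h b) : Int) := by
  unfold pvCross
  have : ∀ k, (([h].countP (fun a => pvM a k) : Nat) : Int)
      = if pvM h k then 1 else 0 := by
    intro k; by_cases hm : pvM h k <;> simp [hm]
  rw [List.map_congr_left (fun k _ => this k), PySem.List.sum_map_ite_one_zero]

theorem pvG_eq_pvPC (l : List (String × String)) : pvG [] l = (pvPC l : Int) := by
  induction l with
  | nil => simp [pvG, pvPC]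
  | cons h t ih =>
    simp only [pvG, pvPC, List.countP_nil, List.nil_append]
    rw [pvG_split t [h], pvCross_singleton, ih]
    push_cast
    ring

-- A's combinations count, grouped by the first element
theorem pvComb2_countP {α : Type} (m : α → α → Bool) (l : List α)
    (pc : List α → Nat)
    (hpc : ∀ h t, pc (h :: t) = t.countP (m h) + pc t) (hnil : pc [] = 0) :
    (pvComb2 l).countP (fun a => m a.1 a.2) = pc l := by
  induction l with
  | nil => simp [pvComb2, hnil]
  | cons h t ih =>
    simp [pvComb2, List.countP_append, List.countP_map, Function.comp_def, ih, hpc]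

-- generic pvPC-shaped count transported along a map
def pvPCf {α : Type} (f : α → String × String) : List α → Nat
  | [] => 0
  | h :: t => t.countP (fun b => pvM (f h) (f b)) + pvPCf f t

theorem pvPCf_map {α : Type} (f : α → String × String) (l : List α) :
    pvPCf f l = pvPC (l.map f) := by
  induction l with
  | nil => rfl
  | cons h t ih => simp [pvPCf, pvPC, List.countP_map, Function.comp_def, ih]

-- ===== VERDICT (by name: the statement is the Claim_ definition above) =====
theorem semi_check_spec : Claim_equal_semi_check := by
  intro x _
  unfold Spec_semi_check semi_check semi_check_alt
  -- A side: foldl-count over combinations = pvPC of the key list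
  have hA : (pvComb2 (PySem.List.pyRange 0 (x.length : Int))).foldl
      (fun r a =>
        if (PySem.Str.slice (PySem.Int.toStr (PySem.List.pyGetD x a.1 0)) (some 2) none ==
              PySem.Str.slice (PySem.Int.toStr (PySem.List.pyGetD x a.2 0)) none (some 2)) ||
           (PySem.Str.slice (PySem.Int.toStr (PySem.List.pyGetD x a.2 0)) (some 2) none ==
              PySem.Str.slice (PySem.Int.toStr (PySem.List.pyGetD x a.1 0)) none (some 2))
        then r + 1 else r) (0 : Int)
      = ((pvPC (x.map pvKey) : Nat) : Int) := by
    have hbody : (fun (r : Int) (a : Int × Int) =>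
        if (PySem.Str.slice (PySem.Int.toStr (PySem.List.pyGetD x a.1 0)) (some 2) none ==
              PySem.Str.slice (PySem.Int.toStr (PySem.List.pyGetD x a.2 0)) none (some 2)) ||
           (PySem.Str.slice (PySem.Int.toStr (PySem.List.pyGetD x a.2 0)) (some 2) none ==
              PySem.Str.slice (PySem.Int.toStr (PySem.List.pyGetD x a.1 0)) none (some 2))
        then r + 1 else r)
        = (fun (r : Int) (a : Int × Int) =>
            if pvM (pvKey (PySem.List.pyGetD x a.1 0)) (pvKey (PySem.List.pyGetD x a.2 0))
            then r + 1 else r) := rfl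
    rw [hbody]
    rw [PySem.List.foldl_count_if
      (fun a : Int × Int => pvM (pvKey (PySem.List.pyGetD x a.1 0)) (pvKey (PySem.List.pyGetD x a.2 0)))]
    rw [pvComb2_countP (fun i j => pvM (pvKey (PySem.List.pyGetD x i 0)) (pvKey (PySem.List.pyGetD x j 0)))
          (PySem.List.pyRange 0 (x.length : Int))
          (pvPCf (fun i => pvKey (PySem.List.pyGetD x i 0)))
          (fun h t => rfl) rfl]
    rw [pvPCf_map]
    have hmap : (PySem.List.pyRange 0 (x.length : Int)).map
        (fun i => pvKey (PySem.List.pyGetD x i 0)) = x.map pvKey := by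
      rw [show ((fun i => pvKey (PySem.List.pyGetD x i 0))
            = pvKey ∘ (fun j => PySem.List.pyGetD x j 0)) from rfl,
          ← List.map_map, PySem.List.map_pyGetD_pyRange_zero']
    rw [hmap]
    omega
  -- B side: the fold's r component = pvPC of the key list
  have hB : (x.foldl
      (fun (st : PySem.Dict String Int × PySem.Dict String Int × PySem.Dict (String × String) Int × Int) v =>
        match st with
        | (sufSeen, preSeen, pairSeen, r) =>
          let k := pvKey v
          let r' := r + sufSeen.getD k.1 0 + preSeen.getD k.2 0 - pairSeen.getD (k.2, k.1) 0
          (sufSeen.insert k.2 (sufSeen.getD k.2 0 + 1),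
           preSeen.insert k.1 (preSeen.getD k.1 0 + 1),
           pairSeen.insert k (pairSeen.getD k 0 + 1),
           r'))
      (PySem.Dict.empty, PySem.Dict.empty, PySem.Dict.empty, (0 : Int))).2.2.2
      = ((pvPC (x.map pvKey) : Nat) : Int) := by
    have e : x.foldl
        (fun (st : PySem.Dict String Int × PySem.Dict String Int × PySem.Dict (String × String) Int × Int) v =>
          match st with
          | (sufSeen, preSeen, pairSeen, r) =>
            let k := pvKey v
            let r' := r + sufSeen.getD k.1 0 + preSeen.getD k.2 0 - pairSeen.getD (k.2, k.1) 0
            (sufSeen.insert k.2 (sufSeen.getD k.2 0 + 1),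
             preSeen.insert k.1 (preSeen.getD k.1 0 + 1),
             pairSeen.insert k (pairSeen.getD k 0 + 1),
             r'))
        (PySem.Dict.empty, PySem.Dict.empty, PySem.Dict.empty, (0 : Int))
        = (x.map pvKey).foldl pvStep
            (PySem.Dict.empty, PySem.Dict.empty, PySem.Dict.empty, (0 : Int)) := by
      rw [List.foldl_map]
      have hf : (fun (st : PySem.Dict String Int × PySem.Dict String Int × PySem.Dict (String × String) Int × Int) (v : Int) => pvStep st (pvKey v))
          = (fun st v =>
              match st with
              | (sufSeen, preSeen, pairSeen, r) =>
                let k := pvKey v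
                let r' := r + sufSeen.getD k.1 0 + preSeen.getD k.2 0 - pairSeen.getD (k.2, k.1) 0
                (sufSeen.insert k.2 (sufSeen.getD k.2 0 + 1),
                 preSeen.insert k.1 (preSeen.getD k.1 0 + 1),
                 pairSeen.insert k (pairSeen.getD k 0 + 1),
                 r')) := by
        funext st v
        obtain ⟨a, b, c, r⟩ := st
        rfl
      rw [hf]
    rw [e]
    have h0 : (PySem.Dict.empty, PySem.Dict.empty, PySem.Dict.empty, (0 : Int))
        = ((pvSufD [], pvPreD [], pvPairD [], (0 : Int)) :
            PySem.Dict String Int × PySem.Dict String Int × PySem.Dict (String × String) Int × Int) := rfl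
    rw [h0]
    have := pvFold_inv (x.map pvKey) [] 0
    simp only [List.nil_append] at this
    rw [this]
    simp [pvG_eq_pvPC]
  simp only [hA, hB]
  by_cases h : ((pvPC (x.map pvKey) : Nat) : Int) < (x.length : Int) - 1
  · simp [h]; omega
  · simp [h]; omega
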